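-- pv_equiv track=rewrite | github.com/narpfel/adventofcode | 2022/09/solution.py | move_rope
-- ===== SOURCE A (Python) =====
-- ROPE_LENGTH = 10
--
-- def move(point, direction):
--     x, y = point
--
--     if direction == "U":
--         return x, y + 1
--     elif direction == "D":
--         return x, y - 1
--     elif direction == "L":
--         return x - 1, y
--     elif direction == "R":
--         return x + 1, y
--
--     assert False, "unreachable"
--
-- def follow(head, tail):
--     head_x, head_y = head
--     tail_x, tail_y = tail
--
--     if head_x == tail_x:
--         # vertical rule
--         if head_y - tail_y > 1:
--             tail_y += 1
--         elif head_y - tail_y < -1: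
--             tail_y -= 1
--     elif head_y == tail_y:
--         # horizontal rule
--         if head_x - tail_x > 1:
--             tail_x += 1
--         elif head_x - tail_x < -1:
--             tail_x -= 1
--     elif abs(head_y - tail_y) + abs(head_x - tail_x) > 2:
--         # diagonal rule
--         if head_y > tail_y:
--             tail_y += 1
--         elif head_y < tail_y:
--             tail_y -= 1
--         if head_x > tail_x:
--             tail_x += 1
--         elif head_x < tail_x:
--             tail_x -= 1
--
--     return tail_x, tail_y
--
-- def move_rope(steps, recorded_positions):
--     rope = [(0, 0)] * ROPE_LENGTH
--     visited = {position: {(0, 0)} for position in recorded_positions}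
--
--     for direction, n in steps:
--         for _ in range(n):
--             rope[0] = move(rope[0], direction)
--
--             for i in range(len(rope) - 1):
--                 rope[i + 1] = follow(rope[i], rope[i + 1])
--
--             for position in recorded_positions:
--                 visited[position].add(rope[position])
--
--     return tuple(len(visited[position]) for position in recorded_positions)
-- ===== SOURCE B (Python) =====
-- # B: per-knot sequential passes instead of per-step lockstep simulation;
-- # each knot's full path is derived from the previous knot's path, then
-- # visited counts are set sizes of the recorded knots' paths.
--
-- DELTAS = {"U": (0, 1), "D": (0, -1), "L": (-1, 0), "R": (1, 0)}
--
--
-- def sign(v):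
--     return (v > 0) - (v < 0)
--
--
-- def follow_step(hx, hy, tx, ty):
--     if abs(hx - tx) <= 1 and abs(hy - ty) <= 1:
--         return tx, ty
--     return tx + sign(hx - tx), ty + sign(hy - ty)
--
--
-- def move_rope(steps, recorded_positions):
--     x = y = 0
--     head_path = [(0, 0)]
--     for direction, n in steps:
--         for _ in range(n):
--             dx, dy = DELTAS[direction]
--             x += dx
--             y += dy
--             head_path.append((x, y))
--
--     paths = [head_path]
--     for _ in range(9):
--         prev = paths[-1]
--         tx = ty = 0
--         path = [(0, 0)]
--         for hx, hy in prev[1:]: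
--             tx, ty = follow_step(hx, hy, tx, ty)
--             path.append((tx, ty))
--         paths.append(path)
--
--     return tuple(len(set(paths[position])) for position in recorded_positions)
-- ===== Notes on version B (the rewrite author's own statement) =====
-- stated objective: alternative
-- what changed: Replaces the per-step lockstep simulation of all 10 knots with a per-knot decomposition: knot 0's full path is built first, then each knot's path is derived by one sequential pass over the previous knot's recorded path, and the answer is the set size of each recorded knot's path; the follow rule is restated as a single Chebyshev-distance/sign-step formula instead of A's three-branch case analysis.
-- outside the precondition, e.g. on move_rope([], [15]): A returns (1,), B raises IndexError
import Mathlib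
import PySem

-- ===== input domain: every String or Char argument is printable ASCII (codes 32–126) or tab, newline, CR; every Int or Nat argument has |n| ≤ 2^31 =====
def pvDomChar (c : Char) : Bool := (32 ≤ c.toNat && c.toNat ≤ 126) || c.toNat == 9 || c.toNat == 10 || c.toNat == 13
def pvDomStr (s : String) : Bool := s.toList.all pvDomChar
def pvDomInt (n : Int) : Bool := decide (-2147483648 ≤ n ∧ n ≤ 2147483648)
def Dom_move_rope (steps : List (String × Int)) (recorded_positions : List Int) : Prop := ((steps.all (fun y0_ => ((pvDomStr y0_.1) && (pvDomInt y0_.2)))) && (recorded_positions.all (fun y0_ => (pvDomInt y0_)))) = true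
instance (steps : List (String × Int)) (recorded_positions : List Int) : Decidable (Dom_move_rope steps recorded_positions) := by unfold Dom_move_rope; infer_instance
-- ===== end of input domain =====

-- B restructures A's per-step lockstep simulation into per-knot sequential passes
-- (objective: alternative decomposition, same cost); return values proved equal on Pre_.

-- ===== PORT A =====

-- def move(point, direction)  ('x, y = point' ported as projections; the final
-- 'assert False' is unreachable under Pre_, ported as returning the point)
def pvMove (point : Int × Int) (direction : String) : Int × Int :=
  if direction = "U" then (point.1, point.2 + 1)
  else if direction = "D" then (point.1, point.2 - 1)
  else if direction = "L" then (point.1 - 1, point.2)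
  else if direction = "R" then (point.1 + 1, point.2)
  else point

-- def follow(head, tail)  (abs of ints ported via natAbs; branch order kept)
def pvFollow (head tail : Int × Int) : Int × Int :=
  if head.1 = tail.1 then
    (if head.2 - tail.2 > 1 then (tail.1, tail.2 + 1)
     else if head.2 - tail.2 < -1 then (tail.1, tail.2 - 1)
     else tail)
  else if head.2 = tail.2 then
    (if head.1 - tail.1 > 1 then (tail.1 + 1, tail.2)
     else if head.1 - tail.1 < -1 then (tail.1 - 1, tail.2)
     else tail)
  else if (head.2 - tail.2).natAbs + (head.1 - tail.1).natAbs > 2 then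
    (let ty := if head.2 > tail.2 then tail.2 + 1 else if head.2 < tail.2 then tail.2 - 1 else tail.2
     let tx := if head.1 > tail.1 then tail.1 + 1 else if head.1 < tail.1 then tail.1 - 1 else tail.1
     (tx, ty))
  else tail

-- 'for i in range(len(rope) - 1): rope[i+1] = follow(rope[i], rope[i+1])'
-- as sequential update: prev is the already-updated rope[i]
def pvFollowLoop : (Int × Int) → List (Int × Int) → List (Int × Int)
  | _, [] => []
  | prev, t :: rest => pvFollow prev t :: pvFollowLoop (pvFollow prev t) rest

-- 'rope[0] = move(rope[0], direction)' followed by the follow loop (rope is never empty)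
def pvRopeStep (direction : String) : List (Int × Int) → List (Int × Int)
  | [] => []
  | h :: t => pvMove h direction :: pvFollowLoop (pvMove h direction) t

-- 'for position in recorded_positions: visited[position].add(rope[position])'
-- (every recorded position is a key of visited, so Python's d[k] is modify;
-- rope[position] is pyGet?, in range under Pre_)
def pvVisStep (recorded : List Int) (rope : List (Int × Int))
    (v : PySem.Dict Int (PySem.Set (Int × Int))) : PySem.Dict Int (PySem.Set (Int × Int)) :=
  recorded.foldl
    (fun v p => v.modify p PySem.Set.empty
      (fun s => s.add ((PySem.List.pyGet? rope p).getD (0, 0)))) v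

-- body of 'for _ in range(n)'
def pvUnitStep (direction : String) (recorded : List Int)
    (st : List (Int × Int) × PySem.Dict Int (PySem.Set (Int × Int))) :
    List (Int × Int) × PySem.Dict Int (PySem.Set (Int × Int)) :=
  (pvRopeStep direction st.1, pvVisStep recorded (pvRopeStep direction st.1) st.2)

def move_rope (steps : List (String × Int)) (recorded_positions : List Int) : List Int :=
  let rope0 : List (Int × Int) := List.replicate 10 (0, 0)
  let visited0 : PySem.Dict Int (PySem.Set (Int × Int)) :=
    recorded_positions.foldl
      (fun d p => d.insert p (PySem.Set.ofList [(0, 0)])) PySem.Dict.empty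
  let final := steps.foldl
    (fun st dn => (List.range dn.2.toNat).foldl
      (fun st _ => pvUnitStep dn.1 recorded_positions st) st)
    (rope0, visited0)
  recorded_positions.map (fun p => PySem.Set.len (final.2.getD p PySem.Set.empty))

-- ===== PORT B =====

-- DELTAS
def pvDeltas : PySem.Dict String (Int × Int) :=
  PySem.Dict.ofList [("U", (0, 1)), ("D", (0, -1)), ("L", (-1, 0)), ("R", (1, 0))]

-- def sign(v)
def pvSign (v : Int) : Int := (if 0 < v then 1 else 0) - (if v < 0 then 1 else 0)

-- def follow_step(hx, hy, tx, ty)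
def pvFollowStep (hx hy tx ty : Int) : Int × Int :=
  if (hx - tx).natAbs ≤ 1 ∧ (hy - ty).natAbs ≤ 1 then (tx, ty)
  else (tx + pvSign (hx - tx), ty + pvSign (hy - ty))

def move_rope_alt (steps : List (String × Int)) (recorded_positions : List Int) : List Int :=
  -- head path: state ((x, y), head_path)
  let hp := steps.foldl
    (fun (st : (Int × Int) × List (Int × Int)) dn =>
      (List.range dn.2.toNat).foldl
        (fun (st : (Int × Int) × List (Int × Int)) _ =>
          let d := pvDeltas.getD dn.1 (0, 0)  -- DELTAS[direction]; key present under Pre_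
          let p := (st.1.1 + d.1, st.1.2 + d.2)
          (p, st.2 ++ [p])) st) ((0, 0), [(0, 0)])
  -- per-knot passes: paths[-1] is pyGet? (-1) (never empty), prev[1:] is slice
  let paths := (List.range 9).foldl
    (fun (paths : List (List (Int × Int))) _ =>
      let prev := (PySem.List.pyGet? paths (-1)).getD []
      let st := (PySem.List.slice prev (some 1) none).foldl
        (fun (st : (Int × Int) × List (Int × Int)) h =>
          let t := pvFollowStep h.1 h.2 st.1.1 st.1.2
          (t, st.2 ++ [t])) ((0, 0), [(0, 0)])
      paths ++ [st.2]) [hp.2]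
  recorded_positions.map
    (fun p => PySem.Set.len (PySem.Set.ofList ((PySem.List.pyGet? paths p).getD [])))

-- ===== PRECONDITION & SPEC =====

-- Pre_ excludes inputs where A raises (a recorded position outside the rope's
-- index range [-10, 10), or a direction other than U/D/L/R on a step that
-- executes at least one unit move); B's natural indexing/lookup also raises on
-- all of these except when no unit step executes at all, where A accidentally
-- returns a tuple of 1s without ever indexing the rope (see cites).
def Pre_move_rope (steps : List (String × Int)) (recorded_positions : List Int) : Prop :=
  (∀ p ∈ recorded_positions, -10 ≤ p ∧ p < 10) ∧
  (∀ dn ∈ steps, 1 ≤ dn.2 → (dn.1 = "U" ∨ dn.1 = "D" ∨ dn.1 = "L" ∨ dn.1 = "R"))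

instance (steps : List (String × Int)) (recorded_positions : List Int) :
    Decidable (Pre_move_rope steps recorded_positions) := by
  unfold Pre_move_rope; infer_instance

def pvWitness_move_rope : (List (String × Int)) × List Int :=
  ([("R", 4), ("U", 2), ("L", 0)], [0, 1, 9, -1])

def Spec_move_rope (steps : List (String × Int)) (recorded_positions : List Int) (out : List Int) : Prop := out = move_rope_alt steps recorded_positions
instance (steps : List (String × Int)) (recorded_positions : List Int) (out : List Int) : Decidable (Spec_move_rope steps recorded_positions out) := by unfold Spec_move_rope; infer_instance

-- ===== CLAIM (what is proved, stated in full; the proofs are below) =====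
def Claim_equal_move_rope : Prop := ∀ (steps : List (String × Int)) (recorded_positions : List Int), Dom_move_rope steps recorded_positions → Pre_move_rope steps recorded_positions → Spec_move_rope steps recorded_positions (move_rope steps recorded_positions)

-- ===== LEMMAS AND PROOFS =====

-- the flattened list of unit moves
def pvDirs (steps : List (String × Int)) : List String :=
  steps.flatMap (fun dn => List.replicate dn.2.toNat dn.1)

-- reference objects: per-knot position scans
def pvHeadScan : (Int × Int) → List String → List (Int × Int)
  | p, [] => [p]
  | p, d :: ds => p :: pvHeadScan (pvMove p d) ds

def pvFollowScan : (Int × Int) → List (Int × Int) → List (Int × Int)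
  | _, [] => []
  | t, h :: hs => pvFollow h t :: pvFollowScan (pvFollow h t) hs

def pvKnotPath : Nat → List String → List (Int × Int)
  | 0, l => pvHeadScan (0, 0) l
  | i + 1, l => (0, 0) :: pvFollowScan (0, 0) ((pvKnotPath i l).drop 1)

def pvKnotPos (i : Nat) (l : List String) : Int × Int := (pvKnotPath i l).getLastD (0, 0)

def pvFollowFold (t : Int × Int) (hs : List (Int × Int)) : Int × Int :=
  hs.foldl (fun t h => pvFollow h t) t

def pvIdx (p : Int) : Nat := (if p < 0 then p + 10 else p).toNat

def pvSetFor (i : Nat) (l : List String) : PySem.Set (Int × Int) :=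
  PySem.Set.ofList (pvKnotPath i l)

def pvRopeAfter (l : List String) : List (Int × Int) :=
  l.foldl (fun r d => pvRopeStep d r) (List.replicate 10 (0, 0))

theorem pvHeadScan_cons_drop (p : Int × Int) (l : List String) :
    pvHeadScan p l = p :: (pvHeadScan p l).drop 1 := by
  cases l <;> rfl

theorem pvHeadScan_last (l : List String) : ∀ (p z : Int × Int),
    (pvHeadScan p l).getLastD z = l.foldl pvMove p := by
  induction l with
  | nil => intro p z; rfl
  | cons d l ih =>
    intro p z
    show (p :: pvHeadScan (pvMove p d) l).getLastD z = _
    rw [List.getLastD_cons, ih, List.foldl_cons]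

theorem pvHeadScan_snoc (l : List String) : ∀ (p : Int × Int) (d : String),
    pvHeadScan p (l ++ [d]) = pvHeadScan p l ++ [pvMove (l.foldl pvMove p) d] := by
  induction l with
  | nil => intro p d; rfl
  | cons e l ih => intro p d; simp [pvHeadScan, ih]

theorem pvFollowScan_last (hs : List (Int × Int)) : ∀ (t z : Int × Int),
    (t :: pvFollowScan t hs).getLastD z = pvFollowFold t hs := by
  induction hs with
  | nil => intro t z; rfl
  | cons h hs ih =>
    intro t z
    have e : pvFollowScan t (h :: hs) = pvFollow h t :: pvFollowScan (pvFollow h t) hs := rfl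
    rw [e, List.getLastD_cons, ih (pvFollow h t) t]
    rfl

theorem pvFollowScan_snoc (hs : List (Int × Int)) : ∀ (t h : Int × Int),
    pvFollowScan t (hs ++ [h]) = pvFollowScan t hs ++ [pvFollow h (pvFollowFold t hs)] := by
  induction hs with
  | nil => intro t h; rfl
  | cons h0 hs ih =>
    intro t h
    have e : pvFollowScan t ((h0 :: hs) ++ [h])
        = pvFollow h0 t :: pvFollowScan (pvFollow h0 t) (hs ++ [h]) := rfl
    rw [e, ih (pvFollow h0 t) h]
    rfl

theorem pvKnotPath_nil (i : Nat) : pvKnotPath i [] = [(0, 0)] := by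
  induction i with
  | zero => rfl
  | succ i ih => simp [pvKnotPath, ih, pvFollowScan]

theorem pvKnotPath_head (i : Nat) (l : List String) :
    pvKnotPath i l = (0, 0) :: (pvKnotPath i l).drop 1 := by
  cases i with
  | zero => simpa [pvKnotPath] using pvHeadScan_cons_drop (0, 0) l
  | succ j => rfl

theorem pvKnotPos_zero (l : List String) : pvKnotPos 0 l = l.foldl pvMove (0, 0) := by
  show (pvHeadScan (0, 0) l).getLastD (0, 0) = _
  rw [pvHeadScan_last]

theorem pvKnotPos_succ (i : Nat) (l : List String) :
    pvKnotPos (i + 1) l = pvFollowFold (0, 0) ((pvKnotPath i l).drop 1) := by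
  show ((0, 0) :: pvFollowScan (0, 0) ((pvKnotPath i l).drop 1)).getLastD (0, 0) = _
  rw [pvFollowScan_last]

theorem pvKnotPath_snoc (i : Nat) : ∀ (l : List String) (d : String),
    pvKnotPath i (l ++ [d]) = pvKnotPath i l ++ [pvKnotPos i (l ++ [d])] := by
  induction i with
  | zero =>
    intro l d
    show pvHeadScan (0, 0) (l ++ [d]) = pvHeadScan (0, 0) l ++ [pvKnotPos 0 (l ++ [d])]
    rw [pvKnotPos_zero, List.foldl_append, List.foldl_cons, List.foldl_nil, pvHeadScan_snoc]
  | succ i ih =>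
    intro l d
    have hdrop : (pvKnotPath i (l ++ [d])).drop 1
        = (pvKnotPath i l).drop 1 ++ [pvKnotPos i (l ++ [d])] := by
      rw [ih l d]
      conv_lhs => rw [pvKnotPath_head i l]
      simp
    have hpos : pvKnotPos (i + 1) (l ++ [d])
        = pvFollow (pvKnotPos i (l ++ [d])) (pvFollowFold (0, 0) ((pvKnotPath i l).drop 1)) := by
      rw [pvKnotPos_succ, hdrop, pvFollowFold, List.foldl_append]
      rfl
    show (0, 0) :: pvFollowScan (0, 0) ((pvKnotPath i (l ++ [d])).drop 1)
        = pvKnotPath (i + 1) l ++ [pvKnotPos (i + 1) (l ++ [d])]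
    rw [hdrop, pvFollowScan_snoc, hpos]
    rfl

theorem pvKnotPos_nil (i : Nat) : pvKnotPos i [] = (0, 0) := by
  simp [pvKnotPos, pvKnotPath_nil]

theorem pvKnotPos_zero_snoc (l : List String) (d : String) :
    pvKnotPos 0 (l ++ [d]) = pvMove (pvKnotPos 0 l) d := by
  rw [pvKnotPos_zero, pvKnotPos_zero, List.foldl_append, List.foldl_cons, List.foldl_nil]

theorem pvKnotPos_succ_snoc (i : Nat) (l : List String) (d : String) :
    pvKnotPos (i + 1) (l ++ [d]) = pvFollow (pvKnotPos i (l ++ [d])) (pvKnotPos (i + 1) l) := by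
  have hdrop : (pvKnotPath i (l ++ [d])).drop 1
      = (pvKnotPath i l).drop 1 ++ [pvKnotPos i (l ++ [d])] := by
    rw [pvKnotPath_snoc i l d]
    conv_lhs => rw [pvKnotPath_head i l]
    simp
  rw [pvKnotPos_succ i (l ++ [d]), pvKnotPos_succ i l, hdrop, pvFollowFold, List.foldl_append]
  simp [pvFollowFold]

-- the lockstep rope state is the 10 per-knot positions
theorem pvRopeAfter_eq (l : List String) :
    pvRopeAfter l = (List.range 10).map (fun i => pvKnotPos i l) := by
  induction l using List.reverseRecOn with
  | nil =>
    simp [pvRopeAfter, pvKnotPos_nil]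
  | append_singleton l d ih =>
    have hr : List.range 10 = [0, 1, 2, 3, 4, 5, 6, 7, 8, 9] := by decide
    have step : pvRopeAfter (l ++ [d]) = pvRopeStep d (pvRopeAfter l) := by
      simp [pvRopeAfter, List.foldl_append]
    rw [step, ih, hr]
    simp only [List.map_cons, List.map_nil, pvRopeStep, pvFollowLoop]
    simp [pvKnotPos_zero_snoc, pvKnotPos_succ_snoc]

set_option maxHeartbeats 1000000 in
theorem pvFollowStep_eq (hx hy tx ty : Int) :
    pvFollowStep hx hy tx ty = pvFollow (hx, hy) (tx, ty) := by
  dsimp only [pvFollowStep, pvFollow, pvSign]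
  split_ifs <;> simp only [Prod.mk.injEq] <;> constructor <;> omega

-- named loop bodies (defeq to the port's inline lambdas; used so the rewrites below match)
def pvAStep (recorded : List Int) (d : String)
    (st : List (Int × Int) × PySem.Dict Int (PySem.Set (Int × Int))) :
    List (Int × Int) × PySem.Dict Int (PySem.Set (Int × Int)) := pvUnitStep d recorded st

def pvBHeadStep (d : String) (st : (Int × Int) × List (Int × Int)) :
    (Int × Int) × List (Int × Int) :=
  let dd := pvDeltas.getD d (0, 0)
  let q := (st.1.1 + dd.1, st.1.2 + dd.2)
  (q, st.2 ++ [q])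

def pvBKnotStep (st : (Int × Int) × List (Int × Int)) (h : Int × Int) :
    (Int × Int) × List (Int × Int) :=
  let u := pvFollowStep h.1 h.2 st.1.1 st.1.2
  (u, st.2 ++ [u])

def pvBPassStep (paths : List (List (Int × Int))) : List (List (Int × Int)) :=
  let prev := (PySem.List.pyGet? paths (-1)).getD []
  let st := (PySem.List.slice prev (some 1) none).foldl pvBKnotStep ((0, 0), [(0, 0)])
  paths ++ [st.2]

theorem foldl_steps_eq {σ : Type} (f : String → σ → σ) (steps : List (String × Int)) :
    ∀ (s : σ), steps.foldl
        (fun s dn => (List.range dn.2.toNat).foldl (fun s _ => f dn.1 s) s) s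
      = (pvDirs steps).foldl (fun s d => f d s) s := by
  induction steps with
  | nil => intro s; rfl
  | cons dn steps ih =>
    intro s
    have inner : ∀ (n : Nat) (d : String) (s : σ),
        (List.range n).foldl (fun s _ => f d s) s
          = (List.replicate n d).foldl (fun s d => f d s) s := by
      intro n d
      induction n with
      | zero => intro s; rfl
      | succ n ihn =>
        intro s
        rw [List.range_succ, List.replicate_succ', List.foldl_append, List.foldl_append, ihn]
        simp
    simp only [List.foldl_cons, pvDirs, List.flatMap_cons, List.foldl_append]
    rw [inner, ih]
    rfl

theorem mem_pvDirs {steps : List (String × Int)} {d : String}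
    (hpre : ∀ dn ∈ steps, 1 ≤ dn.2 → (dn.1 = "U" ∨ dn.1 = "D" ∨ dn.1 = "L" ∨ dn.1 = "R"))
    (hd : d ∈ pvDirs steps) : d = "U" ∨ d = "D" ∨ d = "L" ∨ d = "R" := by
  simp only [pvDirs, List.mem_flatMap, List.mem_replicate] at hd
  obtain ⟨dn, hmem, hn, rfl⟩ := hd
  exact hpre dn hmem (by omega)

theorem pvDelta_move (d : String) (hd : d = "U" ∨ d = "D" ∨ d = "L" ∨ d = "R")
    (st : (Int × Int) × List (Int × Int)) :
    pvBHeadStep d st = (pvMove st.1 d, st.2 ++ [pvMove st.1 d]) := by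
  have hU : pvDeltas.getD "U" (0, 0) = (0, 1) := by decide
  have hD : pvDeltas.getD "D" (0, 0) = (0, -1) := by decide
  have hL : pvDeltas.getD "L" (0, 0) = (-1, 0) := by decide
  have hR : pvDeltas.getD "R" (0, 0) = (1, 0) := by decide
  rcases hd with rfl | rfl | rfl | rfl <;>
    simp [pvBHeadStep, pvMove, hU, hD, hL, hR] <;> try omega

-- B's head-path fold is the head scan
theorem pvHeadFold_eq (l : List String) :
    ∀ (p : Int × Int) (acc : List (Int × Int)),
    (∀ d ∈ l, d = "U" ∨ d = "D" ∨ d = "L" ∨ d = "R") →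
    l.foldl (fun st d => pvBHeadStep d st) (p, acc)
      = (l.foldl pvMove p, acc ++ (pvHeadScan p l).drop 1) := by
  induction l with
  | nil => intro p acc _; simp [pvHeadScan]
  | cons d l ih =>
    intro p acc hv
    simp only [List.foldl_cons]
    rw [pvDelta_move d (hv d (by simp)) (p, acc)]
    rw [ih (pvMove p d) (acc ++ [pvMove p d]) (fun e he => hv e (by simp [he]))]
    refine congrArg₂ Prod.mk rfl ?_
    calc acc ++ [pvMove p d] ++ (pvHeadScan (pvMove p d) l).drop 1
        = acc ++ (pvMove p d :: (pvHeadScan (pvMove p d) l).drop 1) := by simp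
      _ = acc ++ pvHeadScan (pvMove p d) l := by rw [← pvHeadScan_cons_drop]
      _ = acc ++ (pvHeadScan p (d :: l)).drop 1 := rfl

-- B's per-knot fold is the follow scan
theorem pvKnotFold_eq (hs : List (Int × Int)) : ∀ (t : Int × Int) (acc : List (Int × Int)),
    hs.foldl pvBKnotStep (t, acc) = (pvFollowFold t hs, acc ++ pvFollowScan t hs) := by
  induction hs with
  | nil => intro t acc; simp [pvFollowFold, pvFollowScan]
  | cons h hs ih =>
    intro t acc
    simp only [List.foldl_cons]
    rw [show pvBKnotStep (t, acc) h = (pvFollow h t, acc ++ [pvFollow h t]) from by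
      show (pvFollowStep h.1 h.2 t.1 t.2, acc ++ [pvFollowStep h.1 h.2 t.1 t.2]) = _
      rw [pvFollowStep_eq]]
    rw [ih (pvFollow h t) (acc ++ [pvFollow h t])]
    refine congrArg₂ Prod.mk rfl ?_
    show acc ++ [pvFollow h t] ++ pvFollowScan (pvFollow h t) hs = _
    rw [show pvFollowScan t (h :: hs) = pvFollow h t :: pvFollowScan (pvFollow h t) hs from rfl]
    simp

-- one B pass turns knot i's path into knot (i+1)'s path
theorem pvBPassStep_knot (ds : List String) (i : Nat) (pre : List (List (Int × Int))) :
    pvBPassStep (pre ++ [pvKnotPath i ds])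
      = (pre ++ [pvKnotPath i ds]) ++ [pvKnotPath (i + 1) ds] := by
  show (pre ++ [pvKnotPath i ds]) ++
      [((PySem.List.slice ((PySem.List.pyGet? (pre ++ [pvKnotPath i ds]) (-1)).getD [])
          (some 1) none).foldl pvBKnotStep ((0, 0), [(0, 0)])).2] = _
  rw [PySem.List.pyGet?_neg_one_append_singleton, Option.getD_some,
    PySem.List.slice_from_one, ← List.drop_one,
    pvKnotFold_eq ((pvKnotPath i ds).drop 1) (0, 0) [(0, 0)]]
  rfl

-- B's paths fold produces the knot paths
theorem pvPaths_eq (ds : List String) (j : Nat) :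
    (List.range j).foldl (fun paths _ => pvBPassStep paths) [pvKnotPath 0 ds]
      = (List.range (j + 1)).map (fun i => pvKnotPath i ds) := by
  induction j with
  | zero => simp
  | succ j ih =>
    rw [List.range_succ, List.foldl_append, ih]
    simp only [List.foldl_cons, List.foldl_nil]
    rw [List.range_succ (n := j + 1), List.map_append]
    have hsplit : (List.range (j + 1)).map (fun i => pvKnotPath i ds)
        = ((List.range j).map (fun i => pvKnotPath i ds)) ++ [pvKnotPath j ds] := by
      rw [List.range_succ, List.map_append]
      rfl
    rw [hsplit, pvBPassStep_knot ds j]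
    simp

-- indexing the 10-element knot table with a possibly negative recorded position
theorem pvIdx_get {α : Type} (f : Nat → α) (z : α) (p : Int) (h1 : -10 ≤ p) (h2 : p < 10) :
    (PySem.List.pyGet? ((List.range 10).map f) p).getD z = f (pvIdx p) := by
  have hr : List.range 10 = [0, 1, 2, 3, 4, 5, 6, 7, 8, 9] := by decide
  rw [hr]
  unfold pvIdx
  interval_cases p <;> simp [PySem.List.pyGet?, PySem.List.pyIdx?]

-- the visited-init fold
theorem pvVisInit_eq (recorded : List Int) :
    ∀ (d : PySem.Dict Int (PySem.Set (Int × Int))) (p : Int),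
    (recorded.foldl (fun d q => d.insert q (PySem.Set.ofList [(0, 0)])) d).getD p PySem.Set.empty
      = if p ∈ recorded then PySem.Set.ofList [(0, 0)] else d.getD p PySem.Set.empty := by
  induction recorded with
  | nil => intro d p; simp
  | cons q rec ih =>
    intro d p
    simp only [List.foldl_cons]
    rw [ih]
    by_cases hpq : p = q
    · subst hpq
      by_cases hm : p ∈ rec <;> simp [hm, PySem.Dict.getD_insert_self]
    · by_cases hm : p ∈ rec <;>
        simp [hm, hpq, PySem.Dict.getD_insert_of_ne d _ _ hpq]

-- one visited update pass
theorem pvVisStep_getD (recorded : List Int) (rope : List (Int × Int)) :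
    ∀ (v : PySem.Dict Int (PySem.Set (Int × Int))) (p : Int),
    (pvVisStep recorded rope v).getD p PySem.Set.empty
      = if p ∈ recorded
        then (v.getD p PySem.Set.empty).add ((PySem.List.pyGet? rope p).getD (0, 0))
        else v.getD p PySem.Set.empty := by
  induction recorded with
  | nil => intro v p; simp [pvVisStep]
  | cons q rec ih =>
    intro v p
    show (pvVisStep rec rope
        (v.modify q PySem.Set.empty
          (fun s => s.add ((PySem.List.pyGet? rope q).getD (0, 0))))).getD p PySem.Set.empty = _
    rw [ih]
    rw [PySem.Dict.getD_modify]
    by_cases hpq : p = q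
    · subst hpq
      by_cases hm : p ∈ rec
      · simp [hm]
      · simp [hm]
    · by_cases hm : p ∈ rec <;> simp [hm, hpq]

theorem pvSetFor_snoc (i : Nat) (l : List String) (d : String) :
    pvSetFor i (l ++ [d]) = (pvSetFor i l).add (pvKnotPos i (l ++ [d])) := by
  unfold pvSetFor
  rw [pvKnotPath_snoc, PySem.Set.ofList_eq_foldl, PySem.Set.ofList_eq_foldl, List.foldl_append]
  rfl

-- main invariant for A's lockstep fold over the unit moves
theorem pvAFold_eq (recorded : List Int)
    (hrec : ∀ p ∈ recorded, -10 ≤ p ∧ p < 10) (l : List String) :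
    (l.foldl (fun st d => pvAStep recorded d st)
      (List.replicate 10 (0, 0),
       recorded.foldl (fun d p => d.insert p (PySem.Set.ofList [(0, 0)])) PySem.Dict.empty)).1
      = pvRopeAfter l
    ∧ ∀ p ∈ recorded,
      (l.foldl (fun st d => pvAStep recorded d st)
        (List.replicate 10 (0, 0),
         recorded.foldl (fun d p => d.insert p (PySem.Set.ofList [(0, 0)])) PySem.Dict.empty)).2.getD
          p PySem.Set.empty
        = pvSetFor (pvIdx p) l := by
  induction l using List.reverseRecOn with
  | nil =>
    constructor
    · rfl
    · intro p hp
      show (recorded.foldl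
          (fun d q => d.insert q (PySem.Set.ofList [(0, 0)]))
          PySem.Dict.empty).getD p PySem.Set.empty = pvSetFor (pvIdx p) []
      rw [pvVisInit_eq]
      simp [hp, pvSetFor, pvKnotPath_nil]
  | append_singleton l d ih =>
    obtain ⟨ihr, ihv⟩ := ih
    rw [List.foldl_append]
    simp only [List.foldl_cons, List.foldl_nil]
    set X := l.foldl (fun st d => pvAStep recorded d st)
      (List.replicate 10 ((0 : Int), (0 : Int)),
       recorded.foldl (fun d p => d.insert p (PySem.Set.ofList [(0, 0)])) PySem.Dict.empty) with hX
    have hrope : pvRopeStep d X.1 = pvRopeAfter (l ++ [d]) := by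
      rw [ihr]
      simp [pvRopeAfter, List.foldl_append]
    constructor
    · show pvRopeStep d X.1 = pvRopeAfter (l ++ [d])
      exact hrope
    · intro p hp
      show (pvVisStep recorded (pvRopeStep d X.1) X.2).getD p PySem.Set.empty
          = pvSetFor (pvIdx p) (l ++ [d])
      rw [pvVisStep_getD, if_pos hp, ihv p hp, hrope]
      rw [pvRopeAfter_eq (l ++ [d]),
        pvIdx_get (fun i => pvKnotPos i (l ++ [d])) (0, 0) p (hrec p hp).1 (hrec p hp).2]
      rw [pvSetFor_snoc]

-- ===== VERDICT (by name: the statement is the Claim_ definition above) =====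
theorem move_rope_spec : Claim_equal_move_rope := by
  intro steps recorded _ hpre
  obtain ⟨hrec, hsteps⟩ := hpre
  show (recorded.map (fun p => PySem.Set.len
      ((steps.foldl
        (fun st dn => (List.range dn.2.toNat).foldl (fun st _ => pvAStep recorded dn.1 st) st)
        (List.replicate 10 ((0 : Int), (0 : Int)),
         recorded.foldl (fun d p => d.insert p (PySem.Set.ofList [(0, 0)]))
           PySem.Dict.empty)).2.getD p PySem.Set.empty)))
    = recorded.map (fun p => PySem.Set.len (PySem.Set.ofList ((PySem.List.pyGet?
        ((List.range 9).foldl (fun paths _ => pvBPassStep paths)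
          [(steps.foldl
            (fun st dn => (List.range dn.2.toNat).foldl (fun st _ => pvBHeadStep dn.1 st) st)
            (((0 : Int), (0 : Int)), [((0 : Int), (0 : Int))])).2]) p).getD [])))
  rw [foldl_steps_eq (pvAStep recorded) steps, foldl_steps_eq pvBHeadStep steps]
  rw [pvHeadFold_eq (pvDirs steps) (0, 0) [(0, 0)] (fun d hd => mem_pvDirs hsteps hd)]
  dsimp only
  have hhead : [((0 : Int), (0 : Int))] ++ (pvHeadScan (0, 0) (pvDirs steps)).drop 1
      = pvKnotPath 0 (pvDirs steps) := by
    show _ = pvHeadScan (0, 0) (pvDirs steps)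
    conv_rhs => rw [pvHeadScan_cons_drop (0, 0) (pvDirs steps)]
    rfl
  rw [hhead, pvPaths_eq (pvDirs steps) 9]
  apply List.map_congr_left
  intro p hp
  rw [(pvAFold_eq recorded hrec (pvDirs steps)).2 p hp]
  rw [pvIdx_get (fun i => pvKnotPath i (pvDirs steps)) [] p (hrec p hp).1 (hrec p hp).2]
  rfl
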